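-- pv_equiv track=rewrite | github.com/IanCBrown/practice_questions | bijele.py | bijele
-- ===== SOURCE A (Python) =====
-- def bijele(kings, queens, rooks, bishops, knights, pawns):
--     kings = int(kings)
--     queens = int(queens)
--     rooks = int(rooks)
--     bishops = int(bishops)
--     knights = int(knights)
--     pawns = int(pawns)
--     pieces_needed = [0] * 6
--
--     if kings < 1:
--         pieces_needed[0] = 1 - kings
--     else:
--         pieces_needed[0] = (kings - 1) * -1
--     if queens < 1:
--         pieces_needed[1] = 1 - queens
--     else:
--         pieces_needed[1] = (queens - 1) * -1
--     if rooks < 2: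
--         pieces_needed[2] = 2 - rooks
--     else:
--         pieces_needed[2] = (rooks - 2) * -1
--     if bishops < 2:
--         pieces_needed[3] = 2 - bishops
--     else:
--         pieces_needed[3] = (bishops - 2) * -1
--     if knights < 2:
--         pieces_needed[4] = 2 - knights
--     else:
--         pieces_needed[4] = (knights - 2) * -1
--     if pawns < 8:
--         pieces_needed[5] = 8 - pawns
--     else:
--         pieces_needed[5] = (pawns - 8) * -1
--
--     ret_string = ' '.join(str(i) for i in pieces_needed)
--
--     return ret_string
-- ===== SOURCE B (Python) =====
-- def bijele(kings, queens, rooks, bishops, knights, pawns):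
--     # Recursively consume a list of (target, count) pairs, building the
--     # result string directly by concatenation -- no result list, no join.
--     def go(pairs):
--         (t, c), rest = pairs[0], pairs[1:]
--         s = str(t - int(c))
--         return s if not rest else s + ' ' + go(rest)
--     return go([(1, kings), (1, queens), (2, rooks),
--                (2, bishops), (2, knights), (8, pawns)])
-- ===== Notes on version B (the rewrite author's own statement) =====
-- stated objective: simpler
-- what changed: Replaces six copy-pasted if/else branches, a preallocated result list and a final ' '.join by a recursive helper that consumes (target,count) pairs and builds the output string directly by concatenation (both of A's branches reduce to target - count).
import Mathlib
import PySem

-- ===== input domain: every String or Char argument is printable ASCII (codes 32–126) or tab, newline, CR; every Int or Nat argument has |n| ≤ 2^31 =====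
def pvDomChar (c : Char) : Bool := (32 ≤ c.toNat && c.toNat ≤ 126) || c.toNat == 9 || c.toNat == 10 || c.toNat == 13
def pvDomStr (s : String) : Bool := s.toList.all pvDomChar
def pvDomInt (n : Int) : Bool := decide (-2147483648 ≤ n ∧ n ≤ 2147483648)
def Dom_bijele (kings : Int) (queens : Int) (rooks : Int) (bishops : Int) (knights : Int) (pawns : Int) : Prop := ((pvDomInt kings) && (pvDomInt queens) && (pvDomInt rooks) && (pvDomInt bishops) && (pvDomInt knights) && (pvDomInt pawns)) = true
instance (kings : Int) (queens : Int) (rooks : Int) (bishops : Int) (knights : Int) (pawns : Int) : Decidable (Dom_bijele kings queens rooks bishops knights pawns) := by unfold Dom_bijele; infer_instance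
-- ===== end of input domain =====

-- ===== PORT A =====
-- B replaces the six if/else branches, the result list and the final join by a
-- recursive helper over (target, count) pairs that concatenates the string directly; objective: simpler.
def bijele (kings : Int) (queens : Int) (rooks : Int) (bishops : Int) (knights : Int) (pawns : Int) : String :=
  let p0 : Int := if kings < 1 then 1 - kings else (kings - 1) * (-1)
  let p1 : Int := if queens < 1 then 1 - queens else (queens - 1) * (-1)
  let p2 : Int := if rooks < 2 then 2 - rooks else (rooks - 2) * (-1)
  let p3 : Int := if bishops < 2 then 2 - bishops else (bishops - 2) * (-1)
  let p4 : Int := if knights < 2 then 2 - knights else (knights - 2) * (-1)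
  let p5 : Int := if pawns < 8 then 8 - pawns else (pawns - 8) * (-1)
  let pieces_needed : List Int := [p0, p1, p2, p3, p4, p5]
  PySem.Str.join " " (pieces_needed.map PySem.Int.toStr)

-- ===== PORT B =====
-- helper 'go' from Source B: consume (target, count) pairs, concatenating the output string
def bijeleGo : List (Int × Int) → String
  | [] => ""  -- unreachable from bijele_alt (go is only called on non-empty lists in Source B)
  | (t, c) :: rest =>
    let s := PySem.Int.toStr (t - c)
    if rest.isEmpty then s else s ++ " " ++ bijeleGo rest

def bijele_alt (kings : Int) (queens : Int) (rooks : Int) (bishops : Int) (knights : Int) (pawns : Int) : String :=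
  bijeleGo [(1, kings), (1, queens), (2, rooks), (2, bishops), (2, knights), (8, pawns)]

-- ===== PRECONDITION & SPEC =====
def Spec_bijele (kings : Int) (queens : Int) (rooks : Int) (bishops : Int) (knights : Int) (pawns : Int) (out : String) : Prop := out = bijele_alt kings queens rooks bishops knights pawns
instance (kings : Int) (queens : Int) (rooks : Int) (bishops : Int) (knights : Int) (pawns : Int) (out : String) : Decidable (Spec_bijele kings queens rooks bishops knights pawns out) := by unfold Spec_bijele; infer_instance

-- ===== CLAIM (what is proved, stated in full; the proofs are below) =====
def Claim_equal_bijele : Prop := ∀ (kings : Int) (queens : Int) (rooks : Int) (bishops : Int) (knights : Int) (pawns : Int), Dom_bijele kings queens rooks bishops knights pawns → Spec_bijele kings queens rooks bishops knights pawns (bijele kings queens rooks bishops knights pawns)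

-- ===== LEMMAS AND PROOFS =====

-- ===== VERDICT (by name: the statement is the Claim_ definition above) =====
theorem bijele_spec : Claim_equal_bijele := by
  intro kings queens rooks bishops knights pawns _
  unfold Spec_bijele bijele bijele_alt
  have h : ∀ (a t : Int), (if a < t then t - a else (a - t) * (-1)) = t - a := by
    intro a t; split <;> ring
  simp only [h, bijeleGo, List.isEmpty, List.map, PySem.Str.join]
  rw [← String.toList_inj]
  simp [PySem.Int.toList_toStr, PySem.Chars.join, List.intercalate]
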